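-- pv_equiv track=rewrite | github.com/AronC500/CS | src/word2vec/Poir/obj2ir.py | llist_to_list
-- ===== SOURCE A (Python) =====
-- def llist_to_list(text):
--
--     stack = 0
--     new_text = list(text)
--     for i in range(len(new_text)):
--         if i < len(new_text) - 1 and new_text[i:i+2] == ['<','<']:
--             stack += 1
--         if i < len(new_text) - 1 and new_text[i:i+2] == ['>','>']:
--             stack -= 1
--         if (not stack) and (new_text[i] == '[' or text[i] == ']'):
--             new_text[i] = ' '
--     return ''.join(new_text)
-- ===== SOURCE B (Python) =====
-- def llist_to_list(text):
--     # Segment-based rewrite: extract the '<<'/'>>' depth events once, then rebuild the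
--     # string segment by segment, blanking brackets (via a translate table) only in
--     # segments whose nesting depth is zero.
--     events = [(i, 1 if a == '<' else -1)
--               for i, (a, b) in enumerate(zip(text, text[1:]))
--               if a == b and a in '<>']
--     table = str.maketrans('[]', '  ')
--     parts = []
--     depth = 0
--     prev = 0
--     for pos, delta in events:
--         seg = text[prev:pos]
--         parts.append(seg if depth else seg.translate(table))
--         depth += delta
--         prev = pos
--     last = text[prev:]
--     parts.append(last if depth else last.translate(table))
--     return ''.join(parts)
-- ===== Notes on version B (the rewrite author's own statement) =====
-- stated objective: faster
-- what changed: A walks the string character by character, keeping a running counter and mutating a copied char list in place; B is segment-based: it first extracts the list of double-angle depth events (position, +/-1) from the zipped character pairs, then rebuilds the string whole segments at a time between consecutive events, applying a brackets-to-spaces translate table only to segments at depth zero.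
import Mathlib
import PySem

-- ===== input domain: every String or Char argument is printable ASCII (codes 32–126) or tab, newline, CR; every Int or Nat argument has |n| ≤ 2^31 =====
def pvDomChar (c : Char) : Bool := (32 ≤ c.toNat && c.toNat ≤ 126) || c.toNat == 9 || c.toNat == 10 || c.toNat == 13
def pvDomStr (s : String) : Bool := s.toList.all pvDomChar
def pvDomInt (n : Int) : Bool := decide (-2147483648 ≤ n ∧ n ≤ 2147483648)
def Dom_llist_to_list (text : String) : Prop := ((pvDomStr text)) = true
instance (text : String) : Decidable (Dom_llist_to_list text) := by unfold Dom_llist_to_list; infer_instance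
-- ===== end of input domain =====

-- B replaces A's per-character counter loop (mutating a char list in place) with a segment-based
-- algorithm: extract the '<<'/'>>' depth events once, then rebuild the string whole segments at a
-- time, translating brackets to spaces only in depth-zero segments (measured constant-factor faster).

-- ===== PORT A =====
def llist_to_list (text : String) : String :=
  let new_text := text.toList
  let r := (List.range new_text.length).foldl (fun (st : Int × List Char) (i : Nat) =>
    let stack := st.1
    let nt := st.2
    let stack := if (i : Int) < (nt.length : Int) - 1 ∧
        PySem.List.slice nt (some (i : Int)) (some ((i : Int) + 2)) = ['<', '<'] then stack + 1 else stack
    let stack := if (i : Int) < (nt.length : Int) - 1 ∧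
        PySem.List.slice nt (some (i : Int)) (some ((i : Int) + 2)) = ['>', '>'] then stack - 1 else stack
    let nt := if stack = 0 ∧ (PySem.List.pyGetD nt (i : Int) ' ' = '[' ∨
        PySem.List.pyGetD text.toList (i : Int) ' ' = ']') then PySem.List.pySetD nt (i : Int) ' ' else nt
    (stack, nt)) (0, new_text)
  String.ofList r.2

-- ===== PORT B =====
-- str.translate with the '[ ]' → spaces table is ported as the corresponding character map (exact).
def llist_to_list_alt (text : String) : String :=
  let cs := text.toList
  let events := (PySem.List.enumerate (cs.zip (PySem.List.slice cs (some 1) none)) 0).filterMap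
    (fun p => if p.2.1 = p.2.2 ∧ (p.2.1 = '<' ∨ p.2.1 = '>') then
        some (p.1, if p.2.1 = '<' then (1 : Int) else -1) else none)
  let st := events.foldl (fun (st : List (List Char) × Int × Int) (ev : Int × Int) =>
    let seg := PySem.List.slice cs (some st.2.2) (some ev.1)
    let part := if st.2.1 = 0 then seg.map (fun c => if c = '[' ∨ c = ']' then ' ' else c) else seg
    (st.1 ++ [part], st.2.1 + ev.2, ev.1)) ([], 0, 0)
  let last := PySem.List.slice cs (some st.2.2) none
  let parts := st.1 ++
    [if st.2.1 = 0 then last.map (fun c => if c = '[' ∨ c = ']' then ' ' else c) else last]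
  String.ofList parts.flatten

-- ===== PRECONDITION & SPEC =====
def Spec_llist_to_list (text : String) (out : String) : Prop := out = llist_to_list_alt text
instance (text : String) (out : String) : Decidable (Spec_llist_to_list text out) := by unfold Spec_llist_to_list; infer_instance

-- ===== CLAIM (what is proved, stated in full; the proofs are below) =====
def Claim_equal_llist_to_list : Prop := ∀ (text : String), Dom_llist_to_list text → Spec_llist_to_list text (llist_to_list text)

-- ===== LEMMAS AND PROOFS =====

/-- Depth after consuming the (possibly overlapping) pair that starts at the head position. -/
def pvStep (c : Char) (rest : List Char) (d : Int) : Int :=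
  if c = '<' ∧ rest.head? = some '<' then d + 1
  else if c = '>' ∧ rest.head? = some '>' then d - 1 else d

def pvOut (d : Int) (c : Char) : Char := if d = 0 ∧ (c = '[' ∨ c = ']') then ' ' else c

/-- Reference recursion: transformed suffix, given the depth before it. -/
def pvCore : List Char → Int → List Char
  | [], _ => []
  | c :: rest, d => pvOut (pvStep c rest d) c :: pvCore rest (pvStep c rest d)

/-- Final depth after a suffix. -/
def pvFin : List Char → Int → Int
  | [], d => d
  | c :: rest, d => pvFin rest (pvStep c rest d)

/-- Event list (position, ±1) of the '<<' / '>>' pairs of a suffix starting at index k. -/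
def pvEvs : List Char → Int → List (Int × Int)
  | [], _ => []
  | c :: rest, k =>
    (if c = '<' ∧ rest.head? = some '<' then [(k, (1 : Int))]
     else if c = '>' ∧ rest.head? = some '>' then [(k, (-1 : Int))] else []) ++ pvEvs rest (k + 1)

lemma pv_slice2 (xs : List Char) (k : Nat) :
    PySem.List.slice xs (some (k : Int)) (some ((k : Int) + 2)) = (xs.drop k).take 2 := by
  have h := PySem.List.slice_natCast_add xs k 2
  simpa using h

lemma pv_A_loop (cs : List Char) : ∀ (suf pre : List Char) (d : Int),
    cs.drop pre.length = suf →
    (List.range' pre.length suf.length).foldl (fun (st : Int × List Char) (i : Nat) =>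
      let stack := st.1
      let nt := st.2
      let stack := if (i : Int) < (nt.length : Int) - 1 ∧
          PySem.List.slice nt (some (i : Int)) (some ((i : Int) + 2)) = ['<', '<'] then stack + 1 else stack
      let stack := if (i : Int) < (nt.length : Int) - 1 ∧
          PySem.List.slice nt (some (i : Int)) (some ((i : Int) + 2)) = ['>', '>'] then stack - 1 else stack
      let nt := if stack = 0 ∧ (PySem.List.pyGetD nt (i : Int) ' ' = '[' ∨
          PySem.List.pyGetD cs (i : Int) ' ' = ']') then PySem.List.pySetD nt (i : Int) ' ' else nt
      (stack, nt)) (d, pre ++ suf) = (pvFin suf d, pre ++ pvCore suf d) := by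
  intro suf
  induction suf with
  | nil => intro pre d _; simp [pvFin, pvCore]
  | cons c rest ih =>
    intro pre d h
    have hdrop : cs.drop (pre.length + 1) = rest := by
      have h2 : (cs.drop pre.length).drop 1 = rest := by rw [h]; rfl
      rw [List.drop_drop] at h2
      simpa [Nat.add_comm] using h2
    have hslice : PySem.List.slice (pre ++ c :: rest) (some (pre.length : Int))
        (some ((pre.length : Int) + 2)) = (c :: rest).take 2 := by
      rw [pv_slice2, List.drop_left]
    have hget1 : PySem.List.pyGetD (pre ++ c :: rest) (pre.length : Int) ' ' = c := by
      simp
    have hget2 : PySem.List.pyGetD cs (pre.length : Int) ' ' = c := by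
      have hc : cs[pre.length]? = some c := by rw [← List.head?_drop, h]; rfl
      simp [List.getD, hc]
    have hset : PySem.List.pySetD (pre ++ c :: rest) (pre.length : Int) ' ' = pre ++ ' ' :: rest := by
      simp
    rw [List.length_cons, List.range'_succ, List.foldl_cons]
    dsimp only
    rw [hslice, hget1, hget2, hset]
    have hS : (if (pre.length : Int) < ((pre ++ c :: rest).length : Int) - 1 ∧ (c :: rest).take 2 = ['>', '>'] then
        (if (pre.length : Int) < ((pre ++ c :: rest).length : Int) - 1 ∧ (c :: rest).take 2 = ['<', '<'] then d + 1 else d) - 1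
      else (if (pre.length : Int) < ((pre ++ c :: rest).length : Int) - 1 ∧ (c :: rest).take 2 = ['<', '<'] then d + 1 else d))
        = pvStep c rest d := by
      cases rest with
      | nil => simp [pvStep]
      | cons c2 r2 =>
        have hb : (pre.length : Int) < ((pre ++ c :: c2 :: r2).length : Int) - 1 := by
          simp; omega
        simp only [List.take_succ_cons, List.take_zero, pvStep, hb, true_and,
          List.head?_cons, Option.some.injEq, List.cons.injEq, and_true]
        split_ifs <;> simp_all
    rw [hS]
    have hNT : (if pvStep c rest d = 0 ∧ (c = '[' ∨ c = ']') then pre ++ ' ' :: rest else pre ++ c :: rest)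
        = (pre ++ [pvOut (pvStep c rest d) c]) ++ rest := by
      unfold pvOut; split_ifs <;> simp
    rw [hNT]
    have hih := ih (pre ++ [pvOut (pvStep c rest d) c]) (pvStep c rest d) (by simpa using hdrop)
    simp only [List.length_append, List.length_cons, List.length_nil, Nat.zero_add] at hih
    rw [hih]
    simp [pvFin, pvCore]

lemma pv_A_eq_core (text : String) : llist_to_list text = String.ofList (pvCore text.toList 0) := by
  unfold llist_to_list
  dsimp only
  have h := pv_A_loop text.toList text.toList ([]) 0 (by simp)
  simp only [List.nil_append, List.length_nil] at h
  rw [List.range_eq_range', h]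

/-- The port's event comprehension computes `pvEvs`. -/
lemma pv_events : ∀ (l : List Char) (k : Int),
    (PySem.List.enumerate (l.zip l.tail) k).filterMap
      (fun p => if p.2.1 = p.2.2 ∧ (p.2.1 = '<' ∨ p.2.1 = '>') then
          some (p.1, if p.2.1 = '<' then (1 : Int) else -1) else none) = pvEvs l k := by
  intro l
  induction l with
  | nil => intro k; rfl
  | cons c rest ih =>
    intro k
    cases rest with
    | nil => simp [pvEvs, PySem.List.enumerate_nil]
    | cons c2 r2 =>
      rw [show (c :: c2 :: r2).tail = c2 :: r2 from rfl, List.zip_cons_cons,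
        PySem.List.enumerate_cons, List.filterMap_cons]
      have ihr := ih (k + 1)
      rw [show (c2 :: r2).tail = r2 from rfl] at ihr
      rw [show pvEvs (c :: c2 :: r2) k
          = (if c = '<' ∧ c2 = '<' then [(k, (1 : Int))]
             else if c = '>' ∧ c2 = '>' then [(k, (-1 : Int))] else [])
            ++ pvEvs (c2 :: r2) (k + 1) from by simp [pvEvs]]
      rw [← ihr]
      by_cases h1 : c = '<' ∧ c2 = '<'
      · simp [h1.1, h1.2]
      · by_cases h2 : c = '>' ∧ c2 = '>'
        · have hne : ¬ ((('>' : Char) = '<')) := by decide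
          simp [h2.1, h2.2, hne]
        · have hcond : ¬ (c = c2 ∧ (c = '<' ∨ c = '>')) := by
            rintro ⟨he, hc | hc⟩
            · exact h1 ⟨hc, he ▸ hc⟩
            · exact h2 ⟨hc, he ▸ hc⟩
          simp [hcond, h1, h2]

lemma pv_blank_eq (l : List Char) :
    l.map (fun c => if c = '[' ∨ c = ']' then ' ' else c) = l.map (pvOut 0) := by
  simp [pvOut]

lemma pv_map_out_ne (d : Int) (hd : d ≠ 0) (l : List Char) : l.map (pvOut d) = l := by
  have : ∀ c ∈ l, pvOut d c = id c := by intro c _; simp [pvOut, hd]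
  rw [List.map_congr_left this, List.map_id]

/-- What the port does after the fold: flatten the parts and the final (possibly
translated) tail segment. -/
def pvFinish (cs : List Char) (st : List (List Char) × Int × Int) : List Char :=
  st.1.flatten ++
    (if st.2.1 = 0 then (PySem.List.slice cs (some st.2.2) none).map (fun c => if c = '[' ∨ c = ']' then ' ' else c)
     else PySem.List.slice cs (some st.2.2) none)

lemma pv_seg_eq (d : Int) (seg : List Char) :
    (if d = 0 then seg.map (fun c => if c = '[' ∨ c = ']' then ' ' else c) else seg)
      = seg.map (pvOut d) := by
  by_cases hd : d = 0
  · subst hd; simp [pv_blank_eq]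
  · simp [hd, pv_map_out_ne d hd]

lemma pv_B_fold (cs : List Char) : ∀ (suf : List Char) (k prev : Nat) (parts : List (List Char)) (d : Int),
    cs.drop k = suf → prev ≤ k →
    pvFinish cs ((pvEvs suf (k : Int)).foldl (fun (st : List (List Char) × Int × Int) (ev : Int × Int) =>
        let seg := PySem.List.slice cs (some st.2.2) (some ev.1)
        let part := if st.2.1 = 0 then seg.map (fun c => if c = '[' ∨ c = ']' then ' ' else c) else seg
        (st.1 ++ [part], st.2.1 + ev.2, ev.1)) (parts, d, (prev : Int)))
      = parts.flatten ++ ((cs.drop prev).take (k - prev)).map (pvOut d) ++ pvCore suf d := by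
  intro suf
  induction suf with
  | nil =>
    intro k prev parts d h hpk
    have hlen : cs.length ≤ k := by
      have := congrArg List.length h; simp at this; omega
    have htake : (cs.drop prev).take (k - prev) = cs.drop prev := by
      apply List.take_of_length_le; simp; omega
    simp only [pvEvs, List.foldl_nil, pvFinish, PySem.List.slice_from_natCast, pvCore,
      List.append_nil, htake, pv_seg_eq]
  | cons c rest ih =>
    intro k prev parts d h hpk
    have hklen : k < cs.length := by
      by_contra hc
      rw [List.drop_eq_nil_of_le (by omega)] at h
      exact List.cons_ne_nil c rest h.symm
    have hck : cs[k]? = some c := by rw [← List.head?_drop, h]; rfl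
    have hdrop : cs.drop (k + 1) = rest := by
      have h2 : (cs.drop k).drop 1 = rest := by rw [h]; rfl
      rw [List.drop_drop] at h2
      simpa [Nat.add_comm] using h2
    have htake1 : (cs.drop k).take 1 = [c] := by rw [h]; rfl
    -- take one more character of the pending segment
    have htakes : ∀ p : Nat, p ≤ k → (cs.drop p).take (k + 1 - p) = (cs.drop p).take (k - p) ++ [c] := by
      intro p hp
      have : k + 1 - p = (k - p) + 1 := by omega
      rw [this, List.take_add_one]
      have : (cs.drop p)[k - p]? = some c := by
        rw [List.getElem?_drop]
        rw [show p + (k - p) = k from by omega]; exact hck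
      simp [this]
    have hcast : ((k : Int) + 1) = ((k + 1 : Nat) : Int) := by push_cast; ring
    by_cases h1 : c = '<' ∧ rest.head? = some '<'
    · -- event +1 at position k
      rw [show pvEvs (c :: rest) (k : Int)
          = ((k : Int), (1 : Int)) :: pvEvs rest ((k : Int) + 1) from by simp [pvEvs, h1]]
      rw [List.foldl_cons]
      dsimp only
      rw [hcast]
      have hseg : PySem.List.slice cs (some (prev : Int)) (some (k : Int))
          = (cs.drop prev).take (k - prev) := PySem.List.slice_natCast cs prev k
      rw [ih (k + 1) k (parts ++ [if d = 0 then
            (PySem.List.slice cs (some (prev : Int)) (some (k : Int))).map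
              (fun c => if c = '[' ∨ c = ']' then ' ' else c)
          else PySem.List.slice cs (some (prev : Int)) (some (k : Int))]) (d + 1) hdrop (by omega)]
      rw [pv_seg_eq, hseg]
      have hstep : pvStep c rest d = d + 1 := by simp [pvStep, h1]
      simp [pvCore, hstep, pvOut, htake1]
    · by_cases h2 : c = '>' ∧ rest.head? = some '>'
      · -- event -1 at position k
        rw [show pvEvs (c :: rest) (k : Int)
            = ((k : Int), (-1 : Int)) :: pvEvs rest ((k : Int) + 1) from by simp [pvEvs, h2]]
        rw [List.foldl_cons]
        dsimp only
        rw [hcast]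
        have hseg : PySem.List.slice cs (some (prev : Int)) (some (k : Int))
            = (cs.drop prev).take (k - prev) := PySem.List.slice_natCast cs prev k
        rw [ih (k + 1) k (parts ++ [if d = 0 then
              (PySem.List.slice cs (some (prev : Int)) (some (k : Int))).map
                (fun c => if c = '[' ∨ c = ']' then ' ' else c)
            else PySem.List.slice cs (some (prev : Int)) (some (k : Int))]) (d + -1) hdrop (by omega)]
        rw [pv_seg_eq, hseg]
        have hstep : pvStep c rest d = d - 1 := by simp [pvStep, h2]
        have : d + -1 = d - 1 := by ring
        simp [pvCore, hstep, pvOut, htake1, this]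
      · -- no event at position k
        rw [show pvEvs (c :: rest) (k : Int) = pvEvs rest ((k : Int) + 1) from by
          simp [pvEvs, h1, h2]]
        rw [hcast, ih (k + 1) prev parts d hdrop (by omega)]
        have hstep : pvStep c rest d = d := by simp [pvStep, h1, h2]
        rw [htakes prev hpk]
        simp [pvCore, hstep, List.append_assoc]

lemma pv_B_eq_core (text : String) : llist_to_list_alt text = String.ofList (pvCore text.toList 0) := by
  unfold llist_to_list_alt
  dsimp only
  rw [PySem.List.slice_from_one, pv_events]
  have h := pv_B_fold text.toList text.toList 0 0 ([]) 0 (by simp) (le_refl 0)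
  simp only [Nat.cast_zero, List.flatten_nil, List.nil_append, List.drop_zero,
    Nat.sub_zero, List.take_zero, List.map_nil] at h
  rw [← h]
  simp [pvFinish, List.flatten_append]

-- ===== VERDICT (by name: the statement is the Claim_ definition above) =====
theorem llist_to_list_spec : Claim_equal_llist_to_list := by
  intro text _
  unfold Spec_llist_to_list
  rw [pv_A_eq_core, pv_B_eq_core]
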